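-- pv_equiv track=rewrite | github.com/jwardwell7077/agent-audiobook-maker | src/pipeline/ingestion/advanced_chapterizer.py | _pages_for_span
-- ===== SOURCE A (Python) =====
-- from collections.abc import Sequence
--
-- def _pages_for_span(
--     start: int,
--     end: int,
--     page_offsets: Sequence[tuple[int, int, int]],
-- ) -> tuple[int, int, int]:
--     page_indices = [pi for (pi, s, e) in page_offsets if not (e <= start or s >= end)]
--     if not page_indices:
--         return (0, 0, 0)
--     return (len(page_indices), min(page_indices), max(page_indices))
-- ===== SOURCE B (Python) =====
-- def _pages_for_span(start, end, page_offsets):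
--     """Divide-and-conquer: recursively split the sequence, summarise each half
--     as None or (count, min_pi, max_pi), and merge the two summaries."""
--     def solve(seg):
--         if not seg:
--             return None
--         if len(seg) == 1:
--             pi, s, e = seg[0]
--             if e <= start or s >= end:
--                 return None
--             return (1, pi, pi)
--         mid = len(seg) // 2
--         left = solve(seg[:mid])
--         right = solve(seg[mid:])
--         if left is None:
--             return right
--         if right is None:
--             return left
--         return (left[0] + right[0], min(left[1], right[1]), max(left[2], right[2]))
--
--     r = solve(list(page_offsets))
--     return (0, 0, 0) if r is None else r
-- ===== Notes on version B (the rewrite author's own statement) =====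
-- stated objective: alternative
-- what changed: B replaces A's filter-comprehension plus three separate reductions (len/min/max) with a divide-and-conquer recursion that splits the sequence in half and merges optional (count,min,max) summaries.
import Mathlib
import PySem

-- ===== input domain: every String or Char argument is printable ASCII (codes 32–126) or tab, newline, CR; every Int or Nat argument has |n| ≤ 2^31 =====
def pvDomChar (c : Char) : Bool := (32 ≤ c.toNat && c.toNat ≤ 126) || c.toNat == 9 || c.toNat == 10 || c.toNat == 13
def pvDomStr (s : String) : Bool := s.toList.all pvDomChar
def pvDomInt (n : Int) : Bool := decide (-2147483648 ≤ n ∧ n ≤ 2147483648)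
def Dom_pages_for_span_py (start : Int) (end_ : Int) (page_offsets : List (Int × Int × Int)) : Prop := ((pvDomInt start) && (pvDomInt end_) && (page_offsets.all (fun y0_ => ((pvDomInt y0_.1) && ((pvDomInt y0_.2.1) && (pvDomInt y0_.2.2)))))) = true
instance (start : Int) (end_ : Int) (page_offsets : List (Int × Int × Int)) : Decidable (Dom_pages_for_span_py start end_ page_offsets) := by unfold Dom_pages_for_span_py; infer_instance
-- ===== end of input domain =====

-- B is a divide-and-conquer recursion merging optional (count,min,max) summaries, instead of A's filtered list with three reductions (objective: alternative).

-- ===== PORT A =====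
def pages_for_span_py (start : Int) (end_ : Int) (page_offsets : List (Int × Int × Int)) : Int × Int × Int :=
  let page_indices :=
    (page_offsets.filter (fun y => !(decide (y.2.2 ≤ start) || decide (y.2.1 ≥ end_)))).map (·.1)
  if page_indices = [] then (0, 0, 0)
  else ((page_indices.length : Int),
        (PySem.List.min? page_indices (fun x => x)).getD 0,
        (PySem.List.max? page_indices (fun x => x)).getD 0)

-- ===== PORT B =====
-- merge of two optional half-summaries (B's 'left is None / right is None / combine' branches)
def pvMerge : Option (Int × Int × Int) → Option (Int × Int × Int) → Option (Int × Int × Int)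
  | none, r => r
  | l, none => l
  | some a, some b => some (a.1 + b.1, min a.2.1 b.2.1, max a.2.2 b.2.2)

def pvSolveF (start : Int) (end_ : Int) : Nat → List (Int × Int × Int) → Option (Int × Int × Int)
  | _, [] => none
  | _, [y] => if decide (y.2.2 ≤ start) || decide (y.2.1 ≥ end_) then none else some (1, y.1, y.1)
  | fuel + 1, y1 :: y2 :: rest =>
      let seg := y1 :: y2 :: rest
      let mid := seg.length / 2
      pvMerge (pvSolveF start end_ fuel (seg.take mid)) (pvSolveF start end_ fuel (seg.drop mid))
  | 0, _ :: _ :: _ => none  -- unreachable: the fuel is the list length, which strictly decreases on both halves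

def pvSolve (start : Int) (end_ : Int) (seg : List (Int × Int × Int)) : Option (Int × Int × Int) :=
  pvSolveF start end_ seg.length seg

def pages_for_span_py_alt (start : Int) (end_ : Int) (page_offsets : List (Int × Int × Int)) : Int × Int × Int :=
  match pvSolve start end_ page_offsets with
  | none => (0, 0, 0)
  | some r => r

-- ===== PRECONDITION & SPEC =====
def Spec_pages_for_span_py (start : Int) (end_ : Int) (page_offsets : List (Int × Int × Int)) (out : Int × Int × Int) : Prop := out = pages_for_span_py_alt start end_ page_offsets
instance (start : Int) (end_ : Int) (page_offsets : List (Int × Int × Int)) (out : Int × Int × Int) : Decidable (Spec_pages_for_span_py start end_ page_offsets out) := by unfold Spec_pages_for_span_py; infer_instance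

-- ===== CLAIM (what is proved, stated in full; the proofs are below) =====
def Claim_equal_pages_for_span_py : Prop := ∀ (start : Int) (end_ : Int) (page_offsets : List (Int × Int × Int)), Dom_pages_for_span_py start end_ page_offsets → Spec_pages_for_span_py start end_ page_offsets (pages_for_span_py start end_ page_offsets)

-- ===== LEMMAS AND PROOFS =====

-- the sequential summary of an index list, used only to characterise pvSolve
def pvS (xs : List Int) : Option (Int × Int × Int) :=
  xs.foldl (fun o pi => pvMerge o (some (1, pi, pi))) none

theorem pvMerge_none_right (a : Option (Int × Int × Int)) : pvMerge a none = a := by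
  cases a <;> rfl

theorem pvMerge_assoc (a b c : Option (Int × Int × Int)) :
    pvMerge (pvMerge a b) c = pvMerge a (pvMerge b c) := by
  cases a <;> cases b <;> cases c <;>
    simp [pvMerge, min_assoc, max_assoc, add_assoc]

theorem pvS_foldl_merge (xs : List Int) : ∀ (a b : Option (Int × Int × Int)),
    xs.foldl (fun o pi => pvMerge o (some (1, pi, pi))) (pvMerge a b)
      = pvMerge a (xs.foldl (fun o pi => pvMerge o (some (1, pi, pi))) b) := by
  induction xs with
  | nil => intro a b; rfl
  | cons x t ih =>
    intro a b
    simp only [List.foldl_cons, pvMerge_assoc]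
    exact ih a _

theorem pvS_append (l r : List Int) : pvS (l ++ r) = pvMerge (pvS l) (pvS r) := by
  unfold pvS
  rw [List.foldl_append]
  have := pvS_foldl_merge r (l.foldl (fun o pi => pvMerge o (some (1, pi, pi))) none) none
  rw [pvMerge_none_right] at this
  exact this

theorem pvSolveF_eq (start end_ : Int) : ∀ (fuel : Nat) (seg : List (Int × Int × Int)),
    seg.length ≤ fuel + 1 →
    pvSolveF start end_ fuel seg
      = pvS ((seg.filter (fun y => !(decide (y.2.2 ≤ start) || decide (y.2.1 ≥ end_)))).map (·.1)) := by
  intro fuel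
  induction fuel with
  | zero =>
    intro seg hlen
    match seg with
    | [] => rfl
    | [y] =>
      by_cases h : (decide (y.2.2 ≤ start) || decide (y.2.1 ≥ end_)) = true <;>
        simp [pvSolveF, pvS, List.filter, h, pvMerge]
    | y1 :: y2 :: rest => simp at hlen
  | succ f ih =>
    intro seg hlen
    match seg with
    | [] => rfl
    | [y] =>
      by_cases h : (decide (y.2.2 ≤ start) || decide (y.2.1 ≥ end_)) = true <;>
        simp [pvSolveF, pvS, List.filter, h, pvMerge]
    | y1 :: y2 :: rest =>
      have hlen' : (y1 :: y2 :: rest).length ≤ f + 2 := hlen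
      have h1 : ((y1 :: y2 :: rest).take ((y1 :: y2 :: rest).length / 2)).length ≤ f + 1 := by
        simp only [List.length_take, List.length_cons] at *; omega
      have h2 : ((y1 :: y2 :: rest).drop ((y1 :: y2 :: rest).length / 2)).length ≤ f + 1 := by
        simp only [List.length_drop, List.length_cons] at *; omega
      show pvMerge _ _ = _
      rw [ih _ h1, ih _ h2, ← pvS_append, ← List.map_append, ← List.filter_append,
          List.take_append_drop]

theorem pvSolve_eq (start end_ : Int) (seg : List (Int × Int × Int)) :
    pvSolve start end_ seg
      = pvS ((seg.filter (fun y => !(decide (y.2.2 ≤ start) || decide (y.2.1 ≥ end_)))).map (·.1)) := by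
  exact pvSolveF_eq start end_ seg.length seg (Nat.le_succ _)

theorem pvS_some (t : List Int) : ∀ (c lo hi : Int),
    t.foldl (fun o pi => pvMerge o (some (1, pi, pi))) (some (c, lo, hi))
      = some (c + t.length, t.foldl min lo, t.foldl max hi) := by
  induction t with
  | nil => intro c lo hi; simp
  | cons x t ih =>
    intro c lo hi
    rw [List.foldl_cons]
    show List.foldl _ (pvMerge (some (c, lo, hi)) (some (1, x, x))) t = _
    have hstep : pvMerge (some (c, lo, hi)) (some (1, x, x))
        = some (c + 1, min lo x, max hi x) := rfl
    rw [hstep, ih]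
    refine congrArg some (Prod.ext (by push_cast [List.length_cons]; ring) rfl)

-- ===== VERDICT (by name: the statement is the Claim_ definition above) =====
theorem pages_for_span_py_spec : Claim_equal_pages_for_span_py := by
  intro start end_ page_offsets _
  unfold Spec_pages_for_span_py pages_for_span_py pages_for_span_py_alt
  rw [pvSolve_eq]
  cases hxs : (page_offsets.filter (fun y => !(decide (y.2.2 ≤ start) || decide (y.2.1 ≥ end_)))).map (·.1) with
  | nil => simp [pvS]
  | cons x t =>
    have h : pvS (x :: t) = some ((1 : Int) + (t.length : Int), t.foldl min x, t.foldl max x) := by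
      unfold pvS
      simp only [List.foldl_cons]
      exact pvS_some t 1 x x
    rw [h]
    have hne : (x :: t) ≠ [] := by simp
    simp [hne, PySem.List.min?_id_cons, PySem.List.max?_id_cons]
    ring
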